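-- pv_equiv track=rewrite | github.com/anishkumartech/DSAAssignment22 | ques4.py | check_traversal_match
-- ===== SOURCE A (Python) =====
-- def check_traversal_match(inorder, preorder, postorder):
--     if len(inorder) == len(preorder) == len(postorder) == 0:
--         return True
--
--     if len(inorder) != len(preorder) or len(inorder) != len(postorder):
--         return False
--
--     if len(inorder) == len(preorder) == len(postorder) == 1:
--         return inorder[0] == preorder[0] == postorder[0]
--
--     root = preorder[0]
--
--     # Find the index of the root in the inorder traversal
--     root_index = inorder.index(root)
--
--     # Check if the left subtree matches
--     left_inorder = inorder[:root_index]
--     left_preorder = preorder[1:1 + len(left_inorder)]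
--     left_postorder = postorder[:len(left_inorder)]
--     left_match = check_traversal_match(left_inorder, left_preorder, left_postorder)
--
--     # Check if the right subtree matches
--     right_inorder = inorder[root_index + 1:]
--     right_preorder = preorder[1 + len(left_inorder):]
--     right_postorder = postorder[len(left_inorder):-1]
--     right_match = check_traversal_match(right_inorder, right_preorder, right_postorder)
--
--     return left_match and right_match
-- ===== SOURCE B (Python) =====
-- from bisect import bisect_left
--
--
-- def check_traversal_match(inorder, preorder, postorder):
--     n = len(inorder)
--     if len(preorder) != n or len(postorder) != n:
--         return False
--     # value -> ascending list of its positions in inorder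
--     pos = {}
--     for i, v in enumerate(inorder):
--         pos.setdefault(v, []).append(i)
--
--     # check the subtree spanning inorder[ilo:ihi], preorder[plo:plo+m],
--     # postorder[qlo:qlo+m] (m = ihi - ilo) without building any slice
--     def rec(ilo, ihi, plo, qlo):
--         m = ihi - ilo
--         if m == 0:
--             return True
--         if m == 1:
--             return inorder[ilo] == preorder[plo] == postorder[qlo]
--         root = preorder[plo]
--         idxs = pos.get(root, [])
--         j = bisect_left(idxs, ilo)  # first occurrence of root at index >= ilo
--         if j == len(idxs) or idxs[j] >= ihi:
--             return False
--         k = idxs[j]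
--         l = k - ilo
--         return rec(ilo, k, plo + 1, qlo) and rec(k + 1, ihi, plo + 1 + l, qlo + l)
--
--     return rec(0, n, 0, 0)
-- ===== Notes on version B (the rewrite author's own statement) =====
-- stated objective: faster
-- what changed: B replaces A's per-call list slicing and linear .index scan with index pointers into the original lists plus a once-built value-to-sorted-positions map queried by bisect_left, turning O(n^2) slicing/scanning into O(n log n).
import Mathlib
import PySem

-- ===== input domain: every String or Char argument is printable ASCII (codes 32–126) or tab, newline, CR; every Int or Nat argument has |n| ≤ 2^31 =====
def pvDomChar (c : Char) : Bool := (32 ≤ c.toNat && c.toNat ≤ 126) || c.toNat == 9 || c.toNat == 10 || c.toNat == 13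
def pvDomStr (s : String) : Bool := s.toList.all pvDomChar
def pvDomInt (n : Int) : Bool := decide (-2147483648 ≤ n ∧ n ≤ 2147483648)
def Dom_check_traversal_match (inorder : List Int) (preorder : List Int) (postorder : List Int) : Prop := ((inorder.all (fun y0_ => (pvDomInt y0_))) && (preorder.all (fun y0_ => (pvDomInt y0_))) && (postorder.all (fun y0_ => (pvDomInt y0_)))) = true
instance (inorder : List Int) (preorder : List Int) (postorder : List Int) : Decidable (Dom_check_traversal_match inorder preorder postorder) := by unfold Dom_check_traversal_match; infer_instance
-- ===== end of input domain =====

-- B replaces A's per-call list slicing and linear `.index` scan by index pointers into the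
-- original lists plus a once-built value → sorted-positions map queried with bisect_left.

-- ===== PORT A =====
-- literal transliteration of A; where Python's `.index` raises ValueError the port
-- returns false (those inputs are excluded by Pre_check_traversal_match)
def check_traversal_match (inorder : List Int) (preorder : List Int) (postorder : List Int) : Bool :=
  if inorder.length = 0 ∧ preorder.length = 0 ∧ postorder.length = 0 then true
  else if inorder.length ≠ preorder.length ∨ inorder.length ≠ postorder.length then false
  else if inorder.length = 1 ∧ preorder.length = 1 ∧ postorder.length = 1 then
    decide (PySem.List.pyGet? inorder 0 = PySem.List.pyGet? preorder 0
            ∧ PySem.List.pyGet? preorder 0 = PySem.List.pyGet? postorder 0)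
  else
    match PySem.List.pyGet? preorder 0 with
    | none => false -- unreachable: lengths are equal and nonzero in this branch
    | some root =>
      match hri : PySem.List.index? inorder root with
      | none => false -- Python raises ValueError here (excluded by Pre_)
      | some root_index =>
        let left_inorder := PySem.List.slice inorder none (some (root_index : Int))
        let left_preorder := PySem.List.slice preorder (some 1) (some (1 + (left_inorder.length : Int)))
        let left_postorder := PySem.List.slice postorder none (some (left_inorder.length : Int))
        let left_match := check_traversal_match left_inorder left_preorder left_postorder
        let right_inorder := PySem.List.slice inorder (some ((root_index : Int) + 1)) none
        let right_preorder := PySem.List.slice preorder (some (1 + (left_inorder.length : Int))) none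
        let right_postorder := PySem.List.slice postorder (some (left_inorder.length : Int)) (some (-1))
        let right_match := check_traversal_match right_inorder right_preorder right_postorder
        left_match && right_match
termination_by inorder.length
decreasing_by
  · obtain ⟨hk, _, _⟩ := PySem.List.getElem_of_index?_eq_some hri
    simp [PySem.List.slice_to_natCast]
    omega
  · obtain ⟨hk, _, _⟩ := PySem.List.getElem_of_index?_eq_some hri
    have : ((root_index : Int) + 1) = ((root_index + 1 : Nat) : Int) := by push_cast; ring
    rw [this, PySem.List.slice_from_natCast]
    simp
    omega

-- ===== PORT B =====
-- pos.setdefault(v, []).append(i) inside `for i, v in enumerate(inorder)`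
def pvPosStep (d : PySem.Dict Int (List Int)) (p : Int × Int) : PySem.Dict Int (List Int) :=
  d.modify p.2 [] (fun l => l ++ [p.1])

def pvPosDict (xs : List Int) : PySem.Dict Int (List Int) :=
  (PySem.List.enumerate xs 0).foldl pvPosStep PySem.Dict.empty

-- the inner `rec(ilo, ihi, plo, qlo)` of Source B; the extra `x < ilo` disjunct never
-- holds (bisect_left on an ascending list returns only positions ≥ ilo) and is kept
-- solely so that termination is structural
def pvCmRec (ino pre post : List Int) (pos : PySem.Dict Int (List Int))
    (ilo ihi plo qlo : Nat) : Bool :=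
  if ihi - ilo = 0 then true
  else if ihi - ilo = 1 then
    decide (ino[ilo]? = pre[plo]? ∧ pre[plo]? = post[qlo]?)
  else
    match pre[plo]? with
    | none => false -- unreachable: plo is in range whenever rec is invoked
    | some root =>
      -- idxs = pos.get(root, []); j = bisect_left(idxs, ilo); both written inline
      if PySem.List.bisectLeft (pos.getD root []) (ilo : Int) = (pos.getD root []).length then
        false
      else
        if _hx : (ihi : Int) ≤ (pos.getD root []).getD (PySem.List.bisectLeft (pos.getD root []) (ilo : Int)) 0
            ∨ (pos.getD root []).getD (PySem.List.bisectLeft (pos.getD root []) (ilo : Int)) 0 < (ilo : Int) then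
          false
        else
          let k := ((pos.getD root []).getD (PySem.List.bisectLeft (pos.getD root []) (ilo : Int)) 0).toNat
          let l := k - ilo
          pvCmRec ino pre post pos ilo k (plo + 1) qlo
            && pvCmRec ino pre post pos (k + 1) ihi (plo + 1 + l) (qlo + l)
termination_by ihi - ilo
decreasing_by
  · rw [not_or, not_le, not_lt] at _hx; omega
  · rw [not_or, not_le, not_lt] at _hx; omega

def check_traversal_match_alt (inorder : List Int) (preorder : List Int) (postorder : List Int) : Bool :=
  if preorder.length = inorder.length ∧ postorder.length = inorder.length then
    pvCmRec inorder preorder postorder (pvPosDict inorder) 0 inorder.length 0 0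
  else false

-- ===== PRECONDITION & SPEC =====
-- A raises ValueError exactly when, somewhere in its recursive inorder/preorder split,
-- the current preorder head does not occur in the current inorder segment; that split is
-- inherently recursive, so the no-raise condition is stated as the recursion presOk
-- (over inorder/preorder only — it never looks at postorder or computes A's answer).
-- fuel-structured so the kernel can evaluate it; the fuel starts at ino.length and each
-- recursive call strictly shrinks ino, so the fuel never runs out on a segment of
-- length ≥ 2 and the 0-fuel value `true` is only returned where the ≤ 1 branch would be
def presOk : Nat → List Int → List Int → Bool
  | 0, _, _ => true
  | fuel + 1, ino, pre =>
    if ino.length ≤ 1 then true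
    else
      match pre with
      | [] => true -- unreachable from Pre_: lengths there are equal
      | root :: rest =>
        match PySem.List.index? ino root with
        | none => false
        | some ri =>
          presOk fuel (ino.take ri) (rest.take ri) && presOk fuel (ino.drop (ri + 1)) (rest.drop ri)

def Pre_check_traversal_match (inorder : List Int) (preorder : List Int) (postorder : List Int) : Prop :=
  (inorder.length = preorder.length ∧ inorder.length = postorder.length) →
    presOk inorder.length inorder preorder = true

instance (inorder : List Int) (preorder : List Int) (postorder : List Int) : Decidable (Pre_check_traversal_match inorder preorder postorder) := by unfold Pre_check_traversal_match; infer_instance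

def pvWitness_check_traversal_match : List Int × List Int × List Int :=
  ([2, 1, 3], [1, 2, 3], [2, 3, 1])

def Spec_check_traversal_match (inorder : List Int) (preorder : List Int) (postorder : List Int) (out : Bool) : Prop := out = check_traversal_match_alt inorder preorder postorder
instance (inorder : List Int) (preorder : List Int) (postorder : List Int) (out : Bool) : Decidable (Spec_check_traversal_match inorder preorder postorder out) := by unfold Spec_check_traversal_match; infer_instance

-- ===== CLAIM (what is proved, stated in full; the proofs are below) =====
def Claim_equal_check_traversal_match : Prop := ∀ (inorder : List Int) (preorder : List Int) (postorder : List Int), Dom_check_traversal_match inorder preorder postorder → Pre_check_traversal_match inorder preorder postorder → Spec_check_traversal_match inorder preorder postorder (check_traversal_match inorder preorder postorder)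

-- ===== LEMMAS AND PROOFS =====

-- the ascending list of positions of v in xs
def pvOcc (xs : List Int) (v : Int) : List Int :=
  ((PySem.List.enumerate xs 0).filter (fun p => p.2 == v)).map (·.1)

theorem pvPosFold (xs : List Int) : ∀ (s : Int) (d : PySem.Dict Int (List Int)) (v : Int),
    ((PySem.List.enumerate xs s).foldl pvPosStep d).getD v []
      = d.getD v [] ++ ((PySem.List.enumerate xs s).filter (fun p => p.2 == v)).map (·.1) := by
  induction xs with
  | nil => simp [PySem.List.enumerate_nil]
  | cons x xs ih =>
    intro s d v
    rw [PySem.List.enumerate_cons]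
    simp only [List.foldl_cons, List.filter_cons]
    rw [ih]
    by_cases hv : x = v
    · subst hv
      simp [pvPosStep, PySem.Dict.getD_modify_self]
    · have hne : v ≠ x := fun h => hv h.symm
      simp [pvPosStep, PySem.Dict.getD_modify_of_ne _ _ _ hne, hv]

theorem pvPosDict_getD (xs : List Int) (v : Int) :
    (pvPosDict xs).getD v [] = pvOcc xs v := by
  rw [pvPosDict, pvPosFold, pvOcc, PySem.Dict.getD_empty, List.nil_append]

theorem pvOcc_pairwise (xs : List Int) (v : Int) :
    (pvOcc xs v).Pairwise (· ≤ ·) := by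
  rw [pvOcc, List.pairwise_map]
  exact ((PySem.List.pairwise_lt_enumerate xs 0).sublist List.filter_sublist).imp le_of_lt

theorem pvOcc_mem (xs : List Int) (v y : Int) :
    y ∈ pvOcc xs v ↔ ∃ k : Nat, k < xs.length ∧ y = (k : Int) ∧ xs[k]? = some v := by
  rw [pvOcc]
  simp only [List.mem_map, List.mem_filter, PySem.List.mem_enumerate_iff]
  constructor
  · rintro ⟨p, ⟨⟨k, hk, rfl⟩, hpv⟩, rfl⟩
    exact ⟨k, hk, by simp, by simp [List.getElem?_eq_getElem hk]; exact (beq_iff_eq.mp hpv)⟩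
  · rintro ⟨k, hk, rfl, hkv⟩
    refine ⟨((k : Int), xs[k]), ⟨⟨k, hk, by simp⟩, ?_⟩, rfl⟩
    have : xs[k] = v := by simpa [List.getElem?_eq_getElem hk] using hkv
    simp [this]

-- the element of xs at a slice position, as a statement about xs itself
theorem pvSliceGet (xs : List Int) (ilo m t : Nat) (_hb : ilo + m ≤ xs.length) (ht : t < m) :
    ((xs.drop ilo).take m)[t]? = xs[ilo + t]? := by
  rw [List.getElem?_take, if_pos ht, List.getElem?_drop]

-- first-occurrence correspondence, none case
theorem pvFirst_none (xs : List Int) (v : Int) (ilo m : Nat)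
    (hb : ilo + m ≤ xs.length)
    (h : PySem.List.index? ((xs.drop ilo).take m) v = none) :
    PySem.List.bisectLeft (pvOcc xs v) (ilo : Int) = (pvOcc xs v).length ∨
      ((ilo + m : Nat) : Int) ≤ (pvOcc xs v).getD (PySem.List.bisectLeft (pvOcc xs v) (ilo : Int)) 0 := by
  have hnm : v ∉ (xs.drop ilo).take m := (PySem.List.index?_eq_none_iff _ _).mp h
  obtain ⟨hjle, hlt, hge⟩ := PySem.List.bisectLeft_spec (pvOcc xs v) (ilo : Int) (pvOcc_pairwise xs v)
  by_cases hj : PySem.List.bisectLeft (pvOcc xs v) (ilo : Int) = (pvOcc xs v).length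
  · exact Or.inl hj
  · right
    have hjlen : PySem.List.bisectLeft (pvOcc xs v) (ilo : Int) < (pvOcc xs v).length := by omega
    rw [List.getD_eq_getElem _ _ hjlen]
    obtain ⟨k, hk, hkeq, hkv⟩ := (pvOcc_mem xs v _).mp (List.getElem_mem hjlen)
    have hger : (ilo : Int) ≤ (pvOcc xs v)[PySem.List.bisectLeft (pvOcc xs v) (ilo : Int)] :=
      hge _ hjlen le_rfl
    rw [hkeq]
    by_contra hcon
    have hk1 : ilo ≤ k := by omega
    have hk2 : k < ilo + m := by omega
    exact hnm (by
      rw [List.mem_iff_getElem?]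
      exact ⟨k - ilo, by rw [pvSliceGet xs ilo m _ hb (by omega)]; rw [show ilo + (k - ilo) = k by omega]; exact hkv⟩)

-- first-occurrence correspondence, some case
theorem pvFirst_some (xs : List Int) (v : Int) (ilo m r : Nat)
    (hb : ilo + m ≤ xs.length)
    (h : PySem.List.index? ((xs.drop ilo).take m) v = some r) :
    PySem.List.bisectLeft (pvOcc xs v) (ilo : Int) ≠ (pvOcc xs v).length ∧
      (pvOcc xs v).getD (PySem.List.bisectLeft (pvOcc xs v) (ilo : Int)) 0 = ((ilo + r : Nat) : Int) ∧
      r < m := by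
  obtain ⟨hjle, hlt, hge⟩ := PySem.List.bisectLeft_spec (pvOcc xs v) (ilo : Int) (pvOcc_pairwise xs v)
  obtain ⟨hr, hrv, hmin⟩ := PySem.List.getElem_of_index?_eq_some h
  have hslen : ((xs.drop ilo).take m).length = m := by simp; omega
  have hrm : r < m := by omega
  have hxr : xs[ilo + r]? = some v := by
    rw [← pvSliceGet xs ilo m r hb hrm, List.getElem?_eq_getElem hr, hrv]
  have hmem : ((ilo + r : Nat) : Int) ∈ pvOcc xs v :=
    (pvOcc_mem xs v _).mpr ⟨ilo + r, by omega, rfl, hxr⟩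
  obtain ⟨t, ht, hteq⟩ := List.mem_iff_getElem.mp hmem
  have htj : PySem.List.bisectLeft (pvOcc xs v) (ilo : Int) ≤ t := by
    by_contra hcon
    have := hlt t ht (by omega)
    rw [hteq] at this
    omega
  have hjlen : PySem.List.bisectLeft (pvOcc xs v) (ilo : Int) < (pvOcc xs v).length := by omega
  refine ⟨by omega, ?_, hrm⟩
  rw [List.getD_eq_getElem _ _ hjlen]
  obtain ⟨k, hk, hkeq, hkv⟩ := (pvOcc_mem xs v _).mp (List.getElem_mem hjlen)
  have hger : (ilo : Int) ≤ (pvOcc xs v)[PySem.List.bisectLeft (pvOcc xs v) (ilo : Int)] :=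
    hge _ hjlen le_rfl
  have hmono : (pvOcc xs v)[PySem.List.bisectLeft (pvOcc xs v) (ilo : Int)] ≤ (pvOcc xs v)[t] := by
    rcases Nat.lt_or_ge (PySem.List.bisectLeft (pvOcc xs v) (ilo : Int)) t with hlt' | hge'
    · exact List.pairwise_iff_getElem.mp (pvOcc_pairwise xs v) _ _ hjlen ht hlt'
    · have heq : PySem.List.bisectLeft (pvOcc xs v) (ilo : Int) = t := by omega
      simp [heq]
  rw [hteq] at hmono
  have hk1 : ilo ≤ k := by omega
  have hk2 : k ≤ ilo + r := by omega
  have hkr : k = ilo + r := by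
    by_contra hcon
    have hklt : k - ilo < r := by omega
    apply hmin (k - ilo) (by omega)
    have h2 : (List.take m (List.drop ilo xs))[k - ilo]? = some v := by
      rw [pvSliceGet xs ilo m _ hb (by omega), show ilo + (k - ilo) = k by omega]; exact hkv
    have h3 := List.getElem?_eq_getElem (show k - ilo < (List.take m (List.drop ilo xs)).length by omega)
    rw [h2] at h3
    exact (Option.some_inj.mp h3.symm)
  rw [hkeq, hkr]

-- the main correspondence: A on the slices equals B's pointer recursion
theorem pvMain (m : Nat) : ∀ (ino pre post : List Int) (ilo plo qlo : Nat),
    ilo + m ≤ ino.length → plo + m ≤ pre.length → qlo + m ≤ post.length →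
    check_traversal_match ((ino.drop ilo).take m) ((pre.drop plo).take m) ((post.drop qlo).take m)
      = pvCmRec ino pre post (pvPosDict ino) ilo (ilo + m) plo qlo := by
  induction m using Nat.strong_induction_on with
  | _ m ih =>
    intro ino pre post ilo plo qlo hbi hbp hbq
    have hli : ((ino.drop ilo).take m).length = m := by simp; omega
    have hlp : ((pre.drop plo).take m).length = m := by simp; omega
    have hlq : ((post.drop qlo).take m).length = m := by simp; omega
    rcases m with _ | _ | n
    · rw [check_traversal_match, pvCmRec]
      simp
    · have g1 : PySem.List.pyGet? ((ino.drop ilo).take 1) 0 = ino[ilo]? := by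
        rw [show (0 : Int) = ((0 : Nat) : Int) from rfl, PySem.List.pyGet?_natCast,
          pvSliceGet ino ilo 1 0 hbi (by omega), Nat.add_zero]
      have g2 : PySem.List.pyGet? ((pre.drop plo).take 1) 0 = pre[plo]? := by
        rw [show (0 : Int) = ((0 : Nat) : Int) from rfl, PySem.List.pyGet?_natCast,
          pvSliceGet pre plo 1 0 hbp (by omega), Nat.add_zero]
      have g3 : PySem.List.pyGet? ((post.drop qlo).take 1) 0 = post[qlo]? := by
        rw [show (0 : Int) = ((0 : Nat) : Int) from rfl, PySem.List.pyGet?_natCast,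
          pvSliceGet post qlo 1 0 hbq (by omega), Nat.add_zero]
      rw [check_traversal_match, pvCmRec]
      rw [if_neg (by rw [hli, hlp, hlq]; omega), if_neg (by rw [hli, hlp, hlq]; omega),
        if_pos (by rw [hli, hlp, hlq]; omega), if_neg (by omega), if_pos (by omega)]
      rw [g1, g2, g3]
    · have hplo : plo < pre.length := by omega
      have hroot : PySem.List.pyGet? ((pre.drop plo).take (n + 1 + 1)) 0 = some (pre[plo]'hplo) := by
        rw [show (0 : Int) = ((0 : Nat) : Int) from rfl, PySem.List.pyGet?_natCast,
          pvSliceGet pre plo (n + 1 + 1) 0 hbp (by omega), Nat.add_zero,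
          List.getElem?_eq_getElem hplo]
      rw [check_traversal_match, pvCmRec]
      rw [if_neg (by rw [hli, hlp, hlq]; omega), if_neg (by rw [hli, hlp, hlq]; omega),
        if_neg (by rw [hli, hlp, hlq]; omega), if_neg (by omega), if_neg (by omega)]
      simp only [hroot, List.getElem?_eq_getElem hplo]
      rcases hidx : PySem.List.index? ((ino.drop ilo).take (n + 1 + 1)) (pre[plo]'hplo)
        with _ | ri
      · -- Python A raises here; both ports return false
        rcases pvFirst_none ino (pre[plo]'hplo) ilo (n + 1 + 1) hbi hidx with hc | hc
        · simp only [pvPosDict_getD, if_pos hc]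
        · by_cases hj : PySem.List.bisectLeft (pvOcc ino (pre[plo]'hplo)) (ilo : Int)
              = (pvOcc ino (pre[plo]'hplo)).length
          · simp only [pvPosDict_getD, if_pos hj]
          · simp only [pvPosDict_getD, if_neg hj, dif_pos (Or.inl hc)]
      · obtain ⟨hj, hgd, hrm⟩ := pvFirst_some ino (pre[plo]'hplo) ilo (n + 1 + 1) ri hbi hidx
        simp only [pvPosDict_getD]
        -- the six slices of A, rewritten to drop/take form on the original lists
        have elen : (PySem.List.slice ((ino.drop ilo).take (n + 1 + 1)) none (some ((ri : Nat) : Int))).length = ri := by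
          rw [PySem.List.slice_to_natCast, List.take_take, min_eq_left (by omega)]
          simp; omega
        have e1 : PySem.List.slice ((ino.drop ilo).take (n + 1 + 1)) none (some ((ri : Nat) : Int))
            = (ino.drop ilo).take ri := by
          rw [PySem.List.slice_to_natCast, List.take_take, min_eq_left (by omega)]
        have ecast1 : (1 : Int) + ((ri : Nat) : Int) = ((1 + ri : Nat) : Int) := by push_cast; ring
        have e2 : PySem.List.slice ((pre.drop plo).take (n + 1 + 1)) (some 1) (some ((1 + ri : Nat) : Int))
            = (pre.drop (plo + 1)).take ri := by
          rw [show (1 : Int) = ((1 : Nat) : Int) from rfl, PySem.List.slice_natCast,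
            List.drop_take, List.take_take, List.drop_drop]
          congr 1
          omega
        have e3 : PySem.List.slice ((post.drop qlo).take (n + 1 + 1)) none (some ((ri : Nat) : Int))
            = (post.drop qlo).take ri := by
          rw [PySem.List.slice_to_natCast, List.take_take, min_eq_left (by omega)]
        have ecast2 : ((ri : Nat) : Int) + 1 = ((ri + 1 : Nat) : Int) := by push_cast; ring
        have e4 : PySem.List.slice ((ino.drop ilo).take (n + 1 + 1)) (some ((ri + 1 : Nat) : Int)) none
            = (ino.drop (ilo + (ri + 1))).take (n + 1 + 1 - (ri + 1)) := by
          rw [PySem.List.slice_from_natCast, List.drop_take, List.drop_drop]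
        have e5 : PySem.List.slice ((pre.drop plo).take (n + 1 + 1)) (some ((1 + ri : Nat) : Int)) none
            = (pre.drop (plo + (1 + ri))).take (n + 1 + 1 - (1 + ri)) := by
          rw [PySem.List.slice_from_natCast, List.drop_take, List.drop_drop]
        have e6 : PySem.List.slice ((post.drop qlo).take (n + 1 + 1)) (some ((ri : Nat) : Int)) (some (-1))
            = (post.drop (qlo + ri)).take (n + 1 + 1 - 1 - ri) := by
          rw [PySem.List.slice, PySem.List.clampIdx_natCast, PySem.List.clampIdx_neg_one]
          rw [hlq, min_eq_left (by omega), List.drop_take, List.take_take, List.drop_drop]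
          congr 1
          omega
        rw [elen, e1, ecast1, e2, e3, ecast2, e4, e5, e6]
        -- B side: the found position is ilo + ri
        simp only [if_neg hj, hgd,
          dif_neg (by push_cast; omega :
            ¬(((ilo + (n + 1 + 1) : Nat) : Int) ≤ ((ilo + ri : Nat) : Int)
              ∨ ((ilo + ri : Nat) : Int) < (ilo : Int))),
          Int.toNat_natCast]
        have hksub : ilo + ri - ilo = ri := by omega
        rw [hksub]
        rw [← ih ri (by omega) ino pre post ilo (plo + 1) qlo (by omega) (by omega) (by omega)]
        have h2 := ih (n + 1 + 1 - (ri + 1)) (by omega) ino pre post (ilo + ri + 1) (plo + 1 + ri)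
          (qlo + ri) (by omega) (by omega) (by omega)
        rw [show ilo + ri + 1 + (n + 1 + 1 - (ri + 1)) = ilo + (n + 1 + 1) from by omega] at h2
        rw [show n + 1 + 1 - 1 - ri = n + 1 + 1 - (ri + 1) from by omega,
          show n + 1 + 1 - (1 + ri) = n + 1 + 1 - (ri + 1) from by omega,
          show plo + (1 + ri) = plo + 1 + ri from by omega,
          show ilo + (ri + 1) = ilo + ri + 1 from by omega, h2]

-- ===== VERDICT (by name: the statement is the Claim_ definition above) =====
theorem check_traversal_match_spec : Claim_equal_check_traversal_match := by
  intro ino pre post _ _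
  unfold Spec_check_traversal_match check_traversal_match_alt
  by_cases hlen : pre.length = ino.length ∧ post.length = ino.length
  · rw [if_pos hlen]
    have := pvMain ino.length ino pre post 0 0 0 (by omega) (by omega) (by omega)
    simp only [List.drop_zero, Nat.zero_add, List.take_length] at this
    rw [show List.take ino.length pre = pre by rw [← hlen.1, List.take_length],
      show List.take ino.length post = post by rw [← hlen.2, List.take_length]] at this
    exact this
  · rw [if_neg hlen]
    rw [check_traversal_match]
    rw [if_neg (by omega), if_pos (by omega)]
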